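-- pv_equiv track=rewrite | github.com/AleksandrYulgu/Aleksandr-Yulgu | task1/task1.py | long_list
-- ===== SOURCE A (Python) =====
-- def create_short_list(a, n, m): #формирую короткие списки обхода, где а это начальное значение (первая цифра)
--     # n это максимально возвожная цифра, m количество цифр в списке
--     short_list = list(range(1, m+1))
--     for i in range(m):
--         if (a > n):
--             a = 1
--         short_list[i] = a
--         a += 1
--     return short_list
--
-- def long_list(n, m): #создаю список обхода
--     string = ''
--     way = [1, ]
--     a = m
--     while True: #работает пока первая цифра списка не станет равной первой цифре начального списка
--         short_list = create_short_list(a, n, m) #сформировал короткий списк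
--         way.append(short_list[0]) #Добавил первую цифру в путь из свормированного короткого списка
--         a = short_list[m-1] #меняю значение а на последнюю цифру в коротком списке
--         if short_list[0] == 1:
--             break
--     for el in way: #преобразовываю список в строку
--         string += str(el)
--     return string
-- ===== SOURCE B (Python) =====
-- def long_list(n, m):
--     # Each round's m-element list is a cyclic run through 1..n, so only its
--     # first element matters; advance it by (v + m - 2) % n + 1 per round
--     # instead of rebuilding an m-element list, and join the digits once.
--     v = m if m <= n else 1
--     parts = ["1"]
--     while True:
--         parts.append(str(v))
--         if v == 1:
--             break
--         v = (v + m - 2) % n + 1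
--     return "".join(parts)
-- ===== Notes on version B (the rewrite author's own statement) =====
-- stated objective: faster
-- what changed: B drops create_short_list entirely: each round's m-element list is a cyclic run through 1..n, so B tracks only its first element and advances it by (v+m-2) % n + 1 per round (no per-round list build), and joins the collected digits once instead of repeated string +=; Pre_ excludes m < 1, where A raises IndexError on the empty short list.
import Mathlib
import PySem

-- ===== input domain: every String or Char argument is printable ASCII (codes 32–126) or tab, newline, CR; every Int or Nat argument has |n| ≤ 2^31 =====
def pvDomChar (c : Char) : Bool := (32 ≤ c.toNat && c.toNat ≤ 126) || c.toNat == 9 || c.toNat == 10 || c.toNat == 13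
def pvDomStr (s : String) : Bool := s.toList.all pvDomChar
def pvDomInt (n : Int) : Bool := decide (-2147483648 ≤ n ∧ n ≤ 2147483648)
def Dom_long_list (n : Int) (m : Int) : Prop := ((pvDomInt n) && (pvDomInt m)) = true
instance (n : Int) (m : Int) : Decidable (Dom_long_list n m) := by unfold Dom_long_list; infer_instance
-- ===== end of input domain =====

-- B replaces A's per-round construction of the m-element "short list" by tracking its
-- first element alone with modular arithmetic (no per-round list build).

-- ===== PORT A =====
-- create_short_list: list(range(1, m+1)), then for i in range(m): wrap a, assign, a += 1.
def createShortList (a n m : Int) : Array Int :=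
  ((PySem.List.pyRange 0 m 1).foldl
    (fun (st : Int × Array Int) i =>
      let a' := if st.1 > n then 1 else st.1
      (a' + 1, st.2.set! i.toNat a'))
    (a, (PySem.List.pyRange 1 (m+1) 1).toArray)).2

-- the 'while True' loop; fuel only makes it total (Python terminates within n rounds on
-- Pre_; short_list[0] / short_list[m-1] are in range on Pre_, so .getD 0 is never the default).
def longListLoop (n m : Int) : Nat → Int → List Int → List Int
  | 0, _, way => way
  | Nat.succ fuel, a, way =>
    let sl := (createShortList a n m).toList
    let first := (PySem.List.pyGet? sl 0).getD 0
    let way' := way ++ [first]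
    let a' := (PySem.List.pyGet? sl (m-1)).getD 0
    if first = 1 then way' else longListLoop n m fuel a' way'

def long_list (n : Int) (m : Int) : String :=
  (longListLoop n m (n.natAbs + m.natAbs + 2) m [1]).foldl (fun s el => s ++ PySem.Int.toStr el) ""

-- ===== PORT B =====
-- same fuel discipline as A's loop (the Python 'while True' terminates on Pre_;
-- the '% n' step is only reached when v ≠ 1, hence only when 1 ≤ n).
def longListAltLoop (n m : Int) : Nat → Int → List String → List String
  | 0, _, parts => parts
  | Nat.succ fuel, v, parts =>
    let parts' := parts ++ [PySem.Int.toStr v]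
    if v = 1 then parts'
    else longListAltLoop n m fuel (PySem.Int.mod (v + m - 2) n + 1) parts'

def long_list_alt (n : Int) (m : Int) : String :=
  let v := if m ≤ n then m else 1
  -- "".join(parts), ported as left-fold concatenation
  (longListAltLoop n m (n.natAbs + m.natAbs + 2) v ["1"]).foldl (fun s p => s ++ p) ""

-- ===== PRECONDITION & SPEC =====
-- For m < 1 the short list is empty and A raises IndexError on short_list[0]; excluded.
def Pre_long_list (n : Int) (m : Int) : Prop := 1 ≤ m
instance (n : Int) (m : Int) : Decidable (Pre_long_list n m) := by unfold Pre_long_list; infer_instance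
def pvWitness_long_list : Int × Int := (5, 3)

def Spec_long_list (n : Int) (m : Int) (out : String) : Prop := out = long_list_alt n m
instance (n : Int) (m : Int) (out : String) : Decidable (Spec_long_list n m out) := by unfold Spec_long_list; infer_instance

-- ===== CLAIM (what is proved, stated in full; the proofs are below) =====
def Claim_equal_long_list : Prop := ∀ (n : Int) (m : Int), Dom_long_list n m → Pre_long_list n m → Spec_long_list n m (long_list n m)

-- ===== LEMMAS AND PROOFS =====

-- the value written into slot j of the short list, and the running counter after j writes
def aseq (n a : Int) : Nat → Int
  | 0 => a
  | j+1 => (if aseq n a j > n then 1 else aseq n a j) + 1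

def wv (n a : Int) (j : Nat) : Int := if aseq n a j > n then 1 else aseq n a j

lemma set!_toArray (l : List Int) (k : Nat) (w : Int) :
    l.toArray.set! k w = (l.set k w).toArray := by
  simp [Array.set!]

lemma csl_fold (n a : Int) (mN : Nat) (l0 : Array Int) (h : mN ≤ l0.size) :
    (PySem.List.pyRange 0 (mN : Int) 1).foldl
      (fun (st : Int × Array Int) i =>
        let a' := if st.1 > n then 1 else st.1
        (a' + 1, st.2.set! i.toNat a'))
      (a, l0)
    = (aseq n a mN, ((List.range mN).map (wv n a) ++ l0.toList.drop mN).toArray) := by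
  induction mN with
  | zero =>
    simp [PySem.List.pyRange_one_eq_nil (by omega : (0:Int) ≤ 0), aseq]
  | succ k ih =>
    have hr : PySem.List.pyRange 0 ((k+1 : Nat) : Int) 1
        = PySem.List.pyRange 0 (k : Int) 1 ++ [(k : Int)] := by
      push_cast
      exact PySem.List.pyRange_one_succ_right (by omega)
    rw [hr, List.foldl_append, ih (by omega)]
    have hklen : k < l0.toList.length := by simp; omega
    simp only [List.foldl_cons, List.foldl_nil]
    refine Prod.ext rfl ?_
    simp only [Int.toNat_natCast]
    rw [set!_toArray]
    congr 1
    rw [List.set_append]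
    have hlen : ((List.range k).map (wv n a)).length = k := by simp
    rw [hlen]
    simp only [lt_irrefl, Nat.sub_self]
    rw [List.drop_eq_getElem_cons hklen, List.set_cons_zero,
      List.range_succ, List.map_append]
    simp [wv]

lemma csl_eq (n a m : Int) (hm : 1 ≤ m) :
    (createShortList a n m).toList = (List.range m.toNat).map (wv n a) := by
  obtain ⟨k, rfl⟩ : ∃ k : Nat, m = (k : Int) := ⟨m.toNat, (Int.toNat_of_nonneg (by omega)).symm⟩
  unfold createShortList
  rw [csl_fold n a k _ (by simp [PySem.List.length_pyRange_one])]
  simp [PySem.List.length_pyRange_one, List.drop_of_length_le]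

lemma wv_spec (n a : Int) (hn : 1 ≤ n) (ha : 1 ≤ a) (j : Nat) :
    1 ≤ wv n a j ∧ wv n a j ≤ n ∧
      wv n a j = ((if a > n then 1 else a) - 1 + (j : Int)) % n + 1 := by
  induction j with
  | zero =>
    have h1 : wv n a 0 = if a > n then 1 else a := by simp [wv, aseq]
    have hb : 1 ≤ wv n a 0 ∧ wv n a 0 ≤ n := by rw [h1]; split_ifs <;> omega
    refine ⟨hb.1, hb.2, ?_⟩
    rw [h1] at hb ⊢
    rw [Nat.cast_zero, add_zero, Int.emod_eq_of_lt (by omega) (by omega)]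
    omega
  | succ j ih =>
    obtain ⟨h1, h2, h3⟩ := ih
    have hstep : wv n a (j+1) = if wv n a j + 1 > n then 1 else wv n a j + 1 := by
      simp only [wv, aseq]
    have hr0 : 0 ≤ ((if a > n then 1 else a) - 1 + (j : Int)) % n :=
      Int.emod_nonneg _ (by omega)
    have hrn : ((if a > n then 1 else a) - 1 + (j : Int)) % n < n :=
      Int.emod_lt_of_pos _ (by omega)
    have hmod : (((if a > n then 1 else a) - 1 + (j : Int)) % n + 1) % n
        = ((if a > n then 1 else a) - 1 + ((j : Nat) + 1 : Nat)) % n := by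
      rw [Int.emod_add_emod]
      push_cast
      ring_nf
    by_cases hc : wv n a j + 1 > n
    · have hrtop : ((if a > n then 1 else a) - 1 + (j : Int)) % n + 1 = n := by omega
      have : ((if a > n then 1 else a) - 1 + ((j : Nat) + 1 : Nat)) % n = 0 := by
        rw [← hmod, hrtop, Int.emod_self]
      rw [hstep, if_pos hc]
      refine ⟨le_refl 1, hn, ?_⟩
      push_cast at this ⊢
      omega
    · have hlt : ((if a > n then 1 else a) - 1 + (j : Int)) % n + 1 < n := by omega
      have : ((if a > n then 1 else a) - 1 + ((j : Nat) + 1 : Nat)) % n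
          = ((if a > n then 1 else a) - 1 + (j : Int)) % n + 1 := by
        rw [← hmod, Int.emod_eq_of_lt (by omega) hlt]
      rw [hstep, if_neg hc]
      push_cast at this ⊢
      omega

lemma loop_eq (n m : Int) (hn : 1 ≤ n) (hm : 1 ≤ m) (fuel : Nat) :
    ∀ (a : Int) (way : List Int), 1 ≤ a →
      (longListLoop n m fuel a way).map PySem.Int.toStr
        = longListAltLoop n m fuel (if a > n then 1 else a) (way.map PySem.Int.toStr) := by
  induction fuel with
  | zero => intro a way ha; simp [longListLoop, longListAltLoop]
  | succ fuel ih =>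
    intro a way ha
    have hcsl := csl_eq n a m hm
    have hmt : 1 ≤ m.toNat := by omega
    have hw0 : wv n a 0 = if a > n then 1 else a := by simp [wv, aseq]
    have hfirst : (PySem.List.pyGet? (createShortList a n m).toList 0).getD 0
        = if a > n then 1 else a := by
      rw [hcsl, show (0 : Int) = ((0 : Nat) : Int) from rfl, PySem.List.pyGet?_natCast]
      rw [List.getElem?_eq_getElem (by simp; omega)]
      simp [hw0]
    have hlast : (PySem.List.pyGet? (createShortList a n m).toList (m - 1)).getD 0
        = wv n a (m.toNat - 1) := by
      rw [hcsl, show m - 1 = ((m.toNat - 1 : Nat) : Int) by omega, PySem.List.pyGet?_natCast]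
      rw [List.getElem?_eq_getElem (by simp; omega)]
      simp
    obtain ⟨hb1, hb2, hb3⟩ := wv_spec n a hn ha (m.toNat - 1)
    simp only [longListLoop, longListAltLoop, hfirst, hlast]
    by_cases h1 : (if a > n then 1 else a) = 1
    · simp [h1]
    · rw [if_neg h1, if_neg h1, ih _ _ hb1]
      have harg : (if a > n then 1 else a) - 1 + ((m.toNat - 1 : Nat) : Int)
          = (if a > n then 1 else a) + m - 2 := by
        omega
      have hv : (if wv n a (m.toNat - 1) > n then 1 else wv n a (m.toNat - 1))
          = PySem.Int.mod ((if a > n then 1 else a) + m - 2) n + 1 := by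
        rw [if_neg (by omega), PySem.Int.mod_eq_emod_of_pos (by omega), ← harg, ← hb3]
      rw [hv]
      simp

lemma toStr_one : PySem.Int.toStr 1 = "1" := by decide

-- ===== VERDICT (by name: the statement is the Claim_ definition above) =====
theorem long_list_spec : Claim_equal_long_list := by
  intro n m _ hpre
  have hm1 : (1 : Int) ≤ m := hpre
  unfold Spec_long_list long_list long_list_alt
  by_cases hn : n < 1
  · have hfirst : (PySem.List.pyGet? (createShortList m n m).toList 0).getD 0 = 1 := by
      rw [csl_eq n m m hm1, show (0 : Int) = ((0 : Nat) : Int) from rfl,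
        PySem.List.pyGet?_natCast]
      rw [List.getElem?_eq_getElem (by simp; omega)]
      simp [wv, aseq]
      omega
    have hv : (if m ≤ n then m else 1) = (1 : Int) := by rw [if_neg (by omega)]
    rw [hv]
    rw [show n.natAbs + m.natAbs + 2 = (n.natAbs + m.natAbs + 1) + 1 from rfl]
    simp only [longListLoop, longListAltLoop, hfirst]
    simp [toStr_one]
  · have hmap : ([1] : List Int).map PySem.Int.toStr = ["1"] := by
      simp [toStr_one]
    rw [← List.foldl_map, loop_eq n m (by omega) hm1 _ m [1] (by omega), hmap]
    have : (if m > n then 1 else m) = (if m ≤ n then m else 1) := by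
      by_cases h : m ≤ n
      · rw [if_neg (by omega), if_pos h]
      · rw [if_pos (by omega), if_neg h]
    rw [this]
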